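-- pv_equiv track=rewrite | github.com/Muhammad-Ali-611/AutoApply | tailoring.py | tailor_bullets
-- ===== SOURCE A (Python) =====
-- from typing import List
--
-- def extract_keywords(text: str, limit: int = 15) -> List[str]:
--     common = {"and","or","the","with","for","to","in","on","of","a","an"}
--     words = [w.strip(".,:;()[]").lower() for w in text.split()]
--     freq = {}
--     for w in words:
--         if len(w) > 2 and w not in common:
--             freq[w] = freq.get(w, 0) + 1
--     return [w for w, _ in sorted(freq.items(), key=lambda x: x[1], reverse=True)[:limit]]
--
-- def tailor_bullets(base_bullets: List[str], job_desc: str) -> List[str]: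
--     kws = set(extract_keywords(job_desc))
--     prioritized = []
--     for b in base_bullets:
--         score = sum(1 for k in kws if k in b.lower())
--         prioritized.append((score, b))
--     prioritized.sort(reverse=True, key=lambda x: x[0])
--     return [b for _, b in prioritized]
-- ===== SOURCE B (Python) =====
-- from typing import List
--
-- def extract_keywords(text: str, limit: int = 15) -> List[str]:
--     common = {"and","or","the","with","for","to","in","on","of","a","an"}
--     words = [w.strip(".,:;()[]").lower() for w in text.split()]
--     freq = {}
--     for w in words:
--         if len(w) > 2 and w not in common:
--             freq[w] = freq.get(w, 0) + 1
--     return [w for w, _ in sorted(freq.items(), key=lambda x: x[1], reverse=True)[:limit]]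
--
-- def tailor_bullets(base_bullets: List[str], job_desc: str) -> List[str]:
--     kws = set(extract_keywords(job_desc))
--     buckets = [[] for _ in range(len(kws) + 1)]
--     for b in base_bullets:
--         low = b.lower()
--         score = sum(1 for k in kws if k in low)
--         buckets[score].append(b)
--     out = []
--     for bucket in reversed(buckets):
--         out.extend(bucket)
--     return out
-- ===== Notes on version B (the rewrite author's own statement) =====
-- stated objective: alternative
-- what changed: Replaces the build-pairs-then-stable-comparison-sort step with a bucket (counting) sort: bullets are appended to score-indexed buckets in one pass and the buckets are concatenated from highest score down, which reproduces the stable descending order without any comparison sort.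
import Mathlib
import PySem

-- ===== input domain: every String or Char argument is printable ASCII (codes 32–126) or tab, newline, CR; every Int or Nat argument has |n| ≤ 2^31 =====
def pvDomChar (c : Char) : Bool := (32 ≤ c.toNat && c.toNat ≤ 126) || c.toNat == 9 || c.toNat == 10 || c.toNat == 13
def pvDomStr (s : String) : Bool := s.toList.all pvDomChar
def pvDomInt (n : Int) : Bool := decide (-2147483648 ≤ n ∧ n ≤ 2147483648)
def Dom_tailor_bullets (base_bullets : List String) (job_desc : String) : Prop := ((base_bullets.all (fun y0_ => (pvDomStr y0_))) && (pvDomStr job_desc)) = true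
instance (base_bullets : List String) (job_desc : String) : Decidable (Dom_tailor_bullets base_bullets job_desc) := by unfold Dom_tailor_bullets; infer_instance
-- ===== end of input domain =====

-- B replaces the stable reverse comparison sort of (score, bullet) pairs by a score-indexed
-- bucket sort concatenated from the highest score down (alternative decomposition, same results).

-- ===== PORT A =====
-- shared module-level helper of both Source A and Source B
def extract_keywords (text : String) (limit : Int) : List String :=
  let common : PySem.Set String :=
    PySem.Set.ofList ["and","or","the","with","for","to","in","on","of","a","an"]
  let words := (PySem.Str.split₀ text).map
    (fun w => PySem.Str.lower (PySem.Str.stripChars w ".,:;()[]"))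
  let freq : PySem.Dict String Int :=
    words.foldl (fun freq w =>
      if PySem.Str.len w > 2 && !(PySem.Set.contains common w)
      then freq.insert w (freq.getD w 0 + 1) else freq) PySem.Dict.empty
  (PySem.List.slice (PySem.List.sorted freq.items (fun x => x.2) true) none (some limit)).map
    (fun x => x.1)

-- score = sum(1 for k in kws if k in b.lower())  (a count over the distinct keywords)
def kwScore (kws : List String) (b : String) : Nat :=
  kws.countP (fun k => PySem.Str.isIn k (PySem.Str.lower b))

def tailor_bullets (base_bullets : List String) (job_desc : String) : List String :=
  let kws : PySem.Set String := PySem.Set.ofList (extract_keywords job_desc 15)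
  let prioritized : List (Nat × String) :=
    base_bullets.foldl (fun acc b => acc ++ [(kwScore kws b, b)]) []
  (PySem.List.sorted prioritized (fun x => x.1) true).map (fun x => x.2)

-- ===== PORT B =====
-- buckets[score].append(b); score ≤ len(kws) always (a count over kws), so the Python index
-- never raises and getD/set are exact here
def tailor_bullets_alt (base_bullets : List String) (job_desc : String) : List String :=
  let kws : PySem.Set String := PySem.Set.ofList (extract_keywords job_desc 15)
  let buckets : List (List String) :=
    base_bullets.foldl
      (fun bks b => bks.set (kwScore kws b) ((bks.getD (kwScore kws b) []) ++ [b]))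
      (List.replicate (kws.length + 1) [])
  buckets.reverse.foldl (fun out bk => out ++ bk) []

-- ===== PRECONDITION & SPEC =====
def Spec_tailor_bullets (base_bullets : List String) (job_desc : String) (out : List String) : Prop := out = tailor_bullets_alt base_bullets job_desc
instance (base_bullets : List String) (job_desc : String) (out : List String) : Decidable (Spec_tailor_bullets base_bullets job_desc out) := by unfold Spec_tailor_bullets; infer_instance

-- ===== CLAIM (what is proved, stated in full; the proofs are below) =====
def Claim_equal_tailor_bullets : Prop := ∀ (base_bullets : List String) (job_desc : String), Dom_tailor_bullets base_bullets job_desc → Spec_tailor_bullets base_bullets job_desc (tailor_bullets base_bullets job_desc)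

-- ===== LEMMAS AND PROOFS =====

-- insertBy passes over a block containing no insertion point
theorem insertBy_append_left {α : Type} (before : α → α → Bool) (x : α)
    (as bs : List α) (h : ∀ y ∈ as, before x y = false) :
    PySem.List.insertBy before x (as ++ bs) = as ++ PySem.List.insertBy before x bs := by
  induction as with
  | nil => rfl
  | cons a as ih =>
      have ha : before x a = false := h a (by simp)
      simp [PySem.List.insertBy, ha, ih (fun y hy => h y (by simp [hy]))]

-- insertBy puts x in front when everything is "before"
theorem insertBy_cons {α : Type} (before : α → α → Bool) (x : α)
    (ys : List α) (h : ∀ y ∈ ys, before x y = true) :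
    PySem.List.insertBy before x ys = x :: ys := by
  cases ys with
  | nil => rfl
  | cons y ys => simp [PySem.List.insertBy, h y (by simp)]

theorem foldl_append_eq_flatten {α : Type} (l : List (List α)) (acc : List α) :
    l.foldl (fun out bk => out ++ bk) acc = acc ++ l.flatten := by
  induction l generalizing acc with
  | nil => simp
  | cons b l ih => simp [ih]

-- the descending bucket concatenation for buckets given as a function on scores
def catBuckets {α : Type} (m : Nat) (f : Nat → List α) : List α :=
  ((List.range m).reverse.map f).flatten

theorem mem_catBuckets {α : Type} {m : Nat} {f : Nat → List α} {a : α} :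
    a ∈ catBuckets m f ↔ ∃ i < m, a ∈ f i := by
  simp only [catBuckets, List.mem_flatten, List.mem_map, List.mem_reverse, List.mem_range]
  constructor
  · rintro ⟨l, ⟨i, hi, rfl⟩, ha⟩; exact ⟨i, hi, ha⟩
  · rintro ⟨i, hi, ha⟩; exact ⟨f i, ⟨i, hi, rfl⟩, ha⟩

-- inserting one element into a well-keyed descending bucket concatenation appends it to its bucket
theorem insertBy_catBuckets {α : Type} (key : α → Nat) (x : α) (m : Nat) (f : Nat → List α)
    (hx : key x < m) (hf : ∀ i, ∀ a ∈ f i, key a = i) :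
    PySem.List.insertBy (fun a b => decide (key b < key a)) x (catBuckets m f)
      = catBuckets m (fun i => if i = key x then f i ++ [x] else f i) := by
  induction m with
  | zero => omega
  | succ m ih =>
      have hr : (List.range (m + 1)).reverse = m :: (List.range m).reverse := by
        simp [List.range_succ]
      by_cases hm : key x = m
      · rw [show catBuckets (m+1) f = f m ++ catBuckets m f by simp [catBuckets, hr]]
        rw [insertBy_append_left _ _ _ _ (fun y hy => by
          have := hf m y hy; simp [this, hm])]
        rw [insertBy_cons _ _ _ (fun y hy => by
          rcases mem_catBuckets.mp hy with ⟨i, him, hyi⟩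
          have := hf i y hyi; simp [this, hm]; omega)]
        have : catBuckets (m+1) (fun i => if i = key x then f i ++ [x] else f i)
            = (f m ++ [x]) ++ catBuckets m (fun i => if i = key x then f i ++ [x] else f i) := by
          simp [catBuckets, hr, hm]
        rw [this]
        have : catBuckets m (fun i => if i = key x then f i ++ [x] else f i)
            = catBuckets m f := by
          apply congrArg List.flatten
          apply List.map_congr_left
          intro i hi
          simp at hi
          have : i ≠ key x := by omega
          simp [this]
        rw [this]; simp
      · have hxm : key x < m := by omega
        rw [show catBuckets (m+1) f = f m ++ catBuckets m f by simp [catBuckets, hr]]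
        rw [insertBy_append_left _ _ _ _ (fun y hy => by
          have := hf m y hy; simp [this]; omega)]
        rw [ih hxm]
        simp [catBuckets, hr, Ne.symm hm]

-- the stable reverse sort IS the descending bucket concatenation of the filters
theorem sorted_rev_eq_catBuckets {α : Type} (key : α → Nat) (xs : List α) (m : Nat)
    (h : ∀ a ∈ xs, key a < m) :
    PySem.List.sorted xs key true
      = catBuckets m (fun i => xs.filter (fun a => decide (key a = i))) := by
  rw [PySem.List.sorted_rev_eq_foldl_insertBy]
  induction xs using List.reverseRecOn with
  | nil =>
      simp [catBuckets, Eq.comm]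
  | append_singleton xs x ih =>
      rw [List.foldl_append, List.foldl_cons, List.foldl_nil]
      rw [ih (fun a ha => h a (by simp [ha]))]
      rw [insertBy_catBuckets key x m _ (h x (by simp))
        (fun i a ha => by simpa using (List.mem_filter.mp ha).2)]
      apply congrArg List.flatten
      apply List.map_congr_left
      intro i _
      by_cases hi : i = key x <;> simp [hi, List.filter_append, Eq.comm]

-- the bucket-building foldl, as a function of the score
theorem buckets_foldl (key : α → Nat) (xs : List α) (m : Nat)
    (h : ∀ a ∈ xs, key a < m) :
    xs.foldl (fun bks a => bks.set (key a) ((bks.getD (key a) []) ++ [a]))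
        (List.replicate m [])
      = (List.range m).map (fun i => xs.filter (fun a => decide (key a = i))) := by
  have main : ∀ (xs : List α) (g : Nat → List α), (∀ a ∈ xs, key a < m) →
      xs.foldl (fun bks a => bks.set (key a) ((bks.getD (key a) []) ++ [a]))
          ((List.range m).map g)
        = (List.range m).map (fun i => g i ++ xs.filter (fun a => decide (key a = i))) := by
    intro xs
    induction xs with
    | nil => intro g _; simp
    | cons x xs ih =>
        intro g hx
        have hxm : key x < m := hx x (by simp)
        rw [List.foldl_cons]
        have hget : ((List.range m).map g).getD (key x) [] = g (key x) := by
          rw [List.getD_eq_getElem?_getD, List.getElem?_map]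
          simp [List.getElem?_range hxm]
        have hset : ((List.range m).map g).set (key x) (g (key x) ++ [x])
            = (List.range m).map (fun i => if i = key x then g i ++ [x] else g i) := by
          apply List.ext_getElem (by simp)
          intro j hj _
          rw [List.getElem_set]
          simp only [List.getElem_map, List.getElem_range]
          by_cases hjx : j = key x
          · simp [hjx]
          · simp [hjx, Ne.symm hjx]
        rw [hget, hset, ih _ (fun a ha => hx a (by simp [ha]))]
        apply List.map_congr_left
        intro i _
        by_cases hi : i = key x <;> simp [hi, Eq.comm]
  have := main xs (fun _ => []) h
  simpa using this

theorem foldl_pairs (kws : List String) (bullets : List String) :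
    bullets.foldl (fun acc b => acc ++ [(kwScore kws b, b)]) []
      = bullets.map (fun b => (kwScore kws b, b)) := by
  have main : ∀ (bs : List String) (acc : List (Nat × String)),
      bs.foldl (fun acc b => acc ++ [(kwScore kws b, b)]) acc
        = acc ++ bs.map (fun b => (kwScore kws b, b)) := by
    intro bs
    induction bs with
    | nil => simp
    | cons b bs ih => intro acc; simp [ih]
  simpa using main bullets []

-- ===== VERDICT (by name: the statement is the Claim_ definition above) =====
theorem tailor_bullets_spec : Claim_equal_tailor_bullets := by
  intro base_bullets job_desc _
  unfold Spec_tailor_bullets tailor_bullets tailor_bullets_alt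
  dsimp only
  set kws := PySem.Set.ofList (extract_keywords job_desc 15) with hkws
  have hscore : ∀ b ∈ base_bullets, kwScore kws b < kws.length + 1 := by
    intro b _
    have := List.countP_le_length (l := kws) (p := fun k => PySem.Str.isIn k (PySem.Str.lower b))
    unfold kwScore; omega
  rw [foldl_pairs]
  rw [sorted_rev_eq_catBuckets (fun x : Nat × String => x.1)
    (base_bullets.map (fun b => (kwScore kws b, b))) (kws.length + 1)
    (by intro a ha; simp at ha; rcases ha with ⟨b, hb, rfl⟩; exact hscore b hb)]
  rw [buckets_foldl (kwScore kws) base_bullets (kws.length + 1) hscore]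
  rw [foldl_append_eq_flatten, List.nil_append, ← List.map_reverse]
  unfold catBuckets
  rw [List.map_flatten, List.map_map]
  apply congrArg List.flatten
  apply List.map_congr_left
  intro i _
  simp [List.filter_map, Function.comp_def]
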